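-- pv_equiv track=rewrite | github.com/DanielZastrau/ProjectEuler | Python/SCRIPTS/Problem62_CubicPermutations.py | backtracking
-- ===== SOURCE A (Python) =====
-- def are_permutations(num, cube):
--     L1 = sorted(list(str(num)))
--     L2 = sorted(list(str(cube)))
--     return L1 == L2
--
-- def backtracking(Cubes, Curr):
--     if Curr:
--         if len(Curr) == 5:
--             bool_ = 1
--             for cube in Cubes:
--                 if cube not in Curr:
--                     bool__ = 1
--
--                     for num in Curr:
--                         if not are_permutations(num, cube):
--                             bool__ = 0
--                     if bool__:
--                         bool_ = 0
--
--             if bool_: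
--                 return min(Curr)
--
--         elif len(Curr) < 5:
--             for cube in Cubes:
--                 if cube not in Curr:
--                     bool_ = 1
--
--                     for num in Curr:
--                         if not are_permutations(num, cube):
--                             bool_ = 0
--                     if bool_:
--                         res = backtracking(Cubes, Curr + [cube])
--
--                         if res is not None:
--                             return res
--
--     else:
--         for cube in Cubes:
--             res = backtracking(Cubes, [cube])
--
--             if res is not None:
--                 return res
-- ===== SOURCE B (Python) =====
-- def backtracking(Cubes, Curr):
--     sig = lambda n: ''.join(sorted(str(n)))
--     if not Curr:
--         groups = {}
--         for c in Cubes: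
--             groups.setdefault(sig(c), set()).add(c)
--         for c in Cubes:
--             if len(groups[sig(c)]) == 5:
--                 return min(groups[sig(c)])
--         return None
--     s = sig(Curr[0])
--     if any(sig(x) != s for x in Curr):
--         return None
--     pool = {c for c in Cubes if sig(c) == s and c not in Curr}
--     if len(Curr) + len(pool) == 5:
--         return min(Curr + list(pool))
--     return None
-- ===== Notes on version B (the rewrite author's own statement) =====
-- stated objective: alternative
-- what changed: A's DFS backtracking over chains of mutually-permuting cubes is replaced by a closed-form computation: for empty Curr one dict pass grouping cubes by sorted-digit signature and a scan for the first cube whose group has exactly 5 distinct members; for nonempty Curr a coherence test plus a single set comprehension collecting the same-signature pool and a length test.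
-- intended difference: On a length-5 Curr whose members are not all digit-permutations of one another, A's final no-extension check passes vacuously and A returns min(Curr) although Curr is no valid 5-member permutation class; B returns None, the intended value. — e.g. on backtracking([], [1, 2, 3, 4, 12]): A returns some 1, B returns none
import Mathlib
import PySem

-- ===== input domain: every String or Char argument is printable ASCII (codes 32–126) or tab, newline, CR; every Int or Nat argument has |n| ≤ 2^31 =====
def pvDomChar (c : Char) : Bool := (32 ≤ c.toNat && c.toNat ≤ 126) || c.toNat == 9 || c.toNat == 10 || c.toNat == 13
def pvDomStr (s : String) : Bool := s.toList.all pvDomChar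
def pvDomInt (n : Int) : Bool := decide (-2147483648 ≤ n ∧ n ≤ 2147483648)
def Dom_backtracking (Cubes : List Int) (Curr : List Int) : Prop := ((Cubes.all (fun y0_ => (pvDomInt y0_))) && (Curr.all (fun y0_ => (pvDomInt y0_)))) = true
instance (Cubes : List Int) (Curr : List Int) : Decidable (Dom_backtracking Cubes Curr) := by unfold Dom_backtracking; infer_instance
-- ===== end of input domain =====

-- B replaces A's recursive DFS backtracking by one closed-form pass: group cubes by sorted-digit
-- signature (empty Curr) / test the same-signature pool directly (nonempty Curr); objective = alternative.

-- ===== PORT A =====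
-- are_permutations(num, cube)
def pvArePermutations (num cube : Int) : Bool :=
  let L1 := PySem.List.sorted (PySem.Int.toChars num) (fun c => c) false
  let L2 := PySem.List.sorted (PySem.Int.toChars cube) (fun c => c) false
  L1 == L2

-- the inner 'bool__' / 'bool_' loop over Curr (identical in both branches of A)
def pvAllPerm (Curr : List Int) (cube : Int) : Bool :=
  Curr.foldl (fun b num => if !(pvArePermutations num cube) then false else b) true

-- the len(Curr) == 5 check loop over Cubes computing bool_
def pvCheck5 (Cubes Curr : List Int) : Bool :=
  Cubes.foldl (fun b cube =>
    if !(Curr.contains cube) then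
      (if pvAllPerm Curr cube then false else b)
    else b) true

-- A's recursion; fuel only makes the recursion total (recursion depth is ≤ 6: Curr grows by one
-- element per call and recursion stops at length 5), it never runs out from the entry point below.
-- the 'for cube in Cubes: … res = backtracking(Cubes, Curr + [cube]); if res is not None: return res' loop
-- ('next' is the recursive call to backtracking with Cubes already applied)
def pvLoop (next : List Int → Option Int) (Curr : List Int) : List Int → Option Int
  | [] => none
  | cube :: rest =>
    if !(Curr.contains cube) then
      if pvAllPerm Curr cube then
        match next (Curr ++ [cube]) with
        | some r => some r
        | none => pvLoop next Curr rest
      else pvLoop next Curr rest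
    else pvLoop next Curr rest

-- the 'else: for cube in Cubes: res = backtracking(Cubes, [cube]) …' loop
def pvLoopE (next : List Int → Option Int) : List Int → Option Int
  | [] => none
  | cube :: rest =>
    match next [cube] with
    | some r => some r
    | none => pvLoopE next rest

def pvGo : Nat → List Int → List Int → Option Int
  | 0, _, _ => none
  | (fuel+1), Cubes, Curr =>
    if Curr ≠ [] then
      if Curr.length = 5 then
        (if pvCheck5 Cubes Curr then PySem.List.min? Curr (fun x => x) else none)
      else if Curr.length < 5 then pvLoop (pvGo fuel Cubes) Curr Cubes
      else none
    else pvLoopE (pvGo fuel Cubes) Cubes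

def backtracking (Cubes : List Int) (Curr : List Int) : Option Int := pvGo 6 Cubes Curr

-- ===== PORT B =====
-- sig(n) = ''.join(sorted(str(n))) — kept as the character list (only compared for equality)
def pvSig (n : Int) : List Char := PySem.List.sorted (PySem.Int.toChars n) (fun c => c) false

-- loop body of the grouping pass: groups.setdefault(sig(c), set()).add(c)
def pvGroupStep (d : PySem.Dict (List Char) (List Int)) (c : Int) : PySem.Dict (List Char) (List Int) :=
  PySem.Dict.insert d (pvSig c) (PySem.Set.add (PySem.Dict.getD d (pvSig c) []) c)

-- groups: dict from signature to the set of cubes carrying it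
def pvGroups (Cubes : List Int) : PySem.Dict (List Char) (List Int) :=
  Cubes.foldl pvGroupStep PySem.Dict.empty

-- 'for c in Cubes: if len(groups[sig(c)]) == 5: return min(groups[sig(c)])'
-- (getD with default []: exact, every scanned key was inserted by pvGroups)
def pvScan (groups : PySem.Dict (List Char) (List Int)) : List Int → Option Int
  | [] => none
  | c :: rest =>
    let g := PySem.Dict.getD groups (pvSig c) []
    if g.length = 5 then PySem.List.min? g (fun x => x) else pvScan groups rest

-- min(Curr + list(pool)): min over values is independent of the set's iteration order, so the
-- insertion-order PySem.Set list is exact here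
def backtracking_alt (Cubes : List Int) (Curr : List Int) : Option Int :=
  match Curr with
  | [] => pvScan (pvGroups Cubes) Cubes
  | c0 :: rest =>
    let s := pvSig c0
    if (c0 :: rest).any (fun x => !(pvSig x == s)) then none
    else
      let pool := PySem.Set.ofList (Cubes.filter (fun c => pvSig c == s && !((c0 :: rest).contains c)))
      if (c0 :: rest).length + pool.length = 5
      then PySem.List.min? ((c0 :: rest) ++ pool) (fun x => x) else none

-- ===== PRECONDITION & SPEC =====
-- On a length-5 Curr whose members are not all digit-permutations of one another, A's final check is
-- vacuously passed and A returns min(Curr) although Curr is no valid 5-member permutation class;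
-- B returns None there, the intended answer.
def D_backtracking (Cubes : List Int) (Curr : List Int) : Prop :=
  Curr.length = 5 ∧ ∃ x ∈ Curr, ∃ y ∈ Curr, pvArePermutations x y = false
instance (Cubes : List Int) (Curr : List Int) : Decidable (D_backtracking Cubes Curr) := by
  unfold D_backtracking; infer_instance

def Spec_backtracking (Cubes : List Int) (Curr : List Int) (out : Option Int) : Prop :=
  ¬ D_backtracking Cubes Curr → out = backtracking_alt Cubes Curr
instance (Cubes : List Int) (Curr : List Int) (out : Option Int) : Decidable (Spec_backtracking Cubes Curr out) := by unfold Spec_backtracking; infer_instance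

def pvDiffWitness_backtracking : List Int × List Int := ([], [1, 2, 3, 4, 12])
def pvDiffWitnessOut_backtracking : (Option Int) × (Option Int) := (some 1, none)

-- ===== CLAIM (what is proved, stated in full; the proofs are below) =====
def Claim_unchanged_backtracking : Prop := ∀ (Cubes : List Int) (Curr : List Int), Dom_backtracking Cubes Curr → Spec_backtracking Cubes Curr (backtracking Cubes Curr)
def Claim_changed_backtracking : Prop := Dom_backtracking (pvDiffWitness_backtracking.1) (pvDiffWitness_backtracking.2) ∧ D_backtracking (pvDiffWitness_backtracking.1) (pvDiffWitness_backtracking.2) ∧ backtracking (pvDiffWitness_backtracking.1) (pvDiffWitness_backtracking.2) = pvDiffWitnessOut_backtracking.1 ∧ backtracking_alt (pvDiffWitness_backtracking.1) (pvDiffWitness_backtracking.2) = pvDiffWitnessOut_backtracking.2 ∧ pvDiffWitnessOut_backtracking.1 ≠ pvDiffWitnessOut_backtracking.2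
def Claim_exact_backtracking : Prop := ∀ (Cubes : List Int) (Curr : List Int), Dom_backtracking Cubes Curr → D_backtracking Cubes Curr → backtracking Cubes Curr ≠ backtracking_alt Cubes Curr

-- ===== LEMMAS AND PROOFS =====

-- the set of cubes a coherent partial chain Curr (all of signature s) can still be extended by:
-- the distinct elements of Cubes of signature s that are not in Curr
def pvPool (Cubes Curr : List Int) (s : List Char) : List Int :=
  PySem.Set.ofList (Cubes.filter (fun c => pvSig c == s && !(Curr.contains c)))

-- closed form of A's search from a coherent nonempty Curr with 5 - j elements
def pvGoSpec (j : Nat) : Prop :=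
  ∀ (fuel : Nat) (Cubes Curr : List Int) (s : List Char),
    j ≤ 4 → j < fuel → Curr ≠ [] → (∀ x ∈ Curr, pvSig x = s) → Curr.length = 5 - j →
    pvGo fuel Cubes Curr =
      (if (pvPool Cubes Curr s).length = j
       then PySem.List.min? (Curr ++ pvPool Cubes Curr s) (fun x => x) else none)

theorem pv_arePerm (num cube : Int) : pvArePermutations num cube = (pvSig num == pvSig cube) := rfl

theorem pv_allPerm_eq (Curr : List Int) (cube : Int) :
    pvAllPerm Curr cube = Curr.all (fun num => pvSig num == pvSig cube) := by
  unfold pvAllPerm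
  have h := PySem.List.foldl_congr_mem Curr
    (fun b num => if !(pvArePermutations num cube) then false else b)
    (fun b num => if (!(pvSig num == pvSig cube)) then false else b) true
    (by
      intro acc x _
      show (if !(pvArePermutations x cube) then false else acc)
        = (if !(pvSig x == pvSig cube) then false else acc)
      rw [pv_arePerm])
  rw [h, PySem.List.foldl_if_false_eq (p := fun num => !(pvSig num == pvSig cube))]
  simp [List.all_eq_not_any_not]

theorem pv_allPerm_coh {Curr : List Int} {s : List Char} (hne : Curr ≠ [])
    (hcoh : ∀ x ∈ Curr, pvSig x = s) (cube : Int) :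
    pvAllPerm Curr cube = (pvSig cube == s) := by
  rw [pv_allPerm_eq]
  cases hb : (pvSig cube == s) with
  | true =>
    have hcs : pvSig cube = s := eq_of_beq hb
    simp only [List.all_eq_true]
    intro num hnum
    rw [hcoh num hnum, hcs]
    exact beq_self_eq_true s
  | false =>
    obtain ⟨y, hy⟩ := List.exists_mem_of_ne_nil Curr hne
    refine List.all_eq_false.mpr ⟨y, hy, ?_⟩
    rw [hcoh y hy]
    intro h
    rw [eq_of_beq h] at hb
    simp at hb

theorem pv_allPerm_incoh {Curr : List Int} {x y : Int} (hx : x ∈ Curr) (hy : y ∈ Curr)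
    (hxy : pvSig x ≠ pvSig y) (cube : Int) : pvAllPerm Curr cube = false := by
  rw [pv_allPerm_eq]
  by_cases hxc : pvSig x = pvSig cube
  · refine List.all_eq_false.mpr ⟨y, hy, ?_⟩
    intro h
    exact hxy (hxc.trans (eq_of_beq h).symm)
  · refine List.all_eq_false.mpr ⟨x, hx, ?_⟩
    intro h
    exact hxc (eq_of_beq h)

theorem pv_check5_eq (Cubes Curr : List Int) :
    pvCheck5 Cubes Curr = !(Cubes.any (fun cube => !(Curr.contains cube) && pvAllPerm Curr cube)) := by
  unfold pvCheck5
  have h := PySem.List.foldl_congr_mem Cubes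
    (fun b cube => if !(Curr.contains cube) then (if pvAllPerm Curr cube then false else b) else b)
    (fun b cube => if (!(Curr.contains cube) && pvAllPerm Curr cube) then false else b) true
    (by
      intro acc x _
      by_cases h1 : Curr.contains x <;> by_cases h2 : pvAllPerm Curr x <;>
        simp [*])
  rw [h, PySem.List.foldl_if_false_eq (p := fun cube => !(Curr.contains cube) && pvAllPerm Curr cube)]
  simp

theorem pv_min_congr {xs ys : List Int} (h : ∀ x : Int, x ∈ xs ↔ x ∈ ys) :
    PySem.List.min? xs (fun x => x) = PySem.List.min? ys (fun x => x) := by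
  cases hx : PySem.List.min? xs (fun x => x) with
  | none =>
    rw [PySem.List.min?_eq_none_iff] at hx
    symm
    rw [PySem.List.min?_eq_none_iff, List.eq_nil_iff_forall_not_mem]
    intro a ha
    rw [hx] at h
    exact (List.not_mem_nil (a := a)) ((h a).mpr ha)
  | some m =>
    cases hy : PySem.List.min? ys (fun x => x) with
    | none =>
      rw [PySem.List.min?_eq_none_iff] at hy
      have := (h m).mp (PySem.List.min?_mem hx)
      rw [hy] at this
      exact absurd this (List.not_mem_nil)
    | some m' =>
      have h1 := PySem.List.min?_mem hx
      have h2 := PySem.List.min?_isMin hx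
      have h3 := PySem.List.min?_mem hy
      have h4 := PySem.List.min?_isMin hy
      have hle : m ≤ m' := h2 m' ((h m').mpr h3)
      have hge : m' ≤ m := h4 m ((h m).mp h1)
      rw [le_antisymm hle hge]

theorem pv_len_sub {P Q : List Int} (hP : P.Nodup) (hQ : Q.Nodup) {c : Int} (hc : c ∈ P)
    (h : ∀ x, x ∈ Q ↔ x ∈ P ∧ x ≠ c) : Q.length + 1 = P.length := by
  have hperm : Q.Perm (P.erase c) := by
    rw [List.perm_ext_iff_of_nodup hQ (hP.erase c)]
    intro a
    rw [hP.mem_erase_iff, h a]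
    tauto
  have hl := hperm.length_eq
  rw [List.length_erase_of_mem hc] at hl
  have hpos : 0 < P.length := List.length_pos_of_mem hc
  omega

theorem pv_pool_mem {Cubes Curr : List Int} {s : List Char} (x : Int) :
    x ∈ pvPool Cubes Curr s ↔ x ∈ Cubes ∧ pvSig x = s ∧ x ∉ Curr := by
  unfold pvPool
  rw [PySem.Set.mem_ofList, List.mem_filter]
  simp

theorem pv_pool_nodup {Cubes Curr : List Int} {s : List Char} : (pvPool Cubes Curr s).Nodup :=
  PySem.Set.nodup_ofList _

theorem pv_pool_snoc {Cubes Curr : List Int} {s : List Char} {c : Int} (x : Int) :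
    x ∈ pvPool Cubes (Curr ++ [c]) s ↔ x ∈ pvPool Cubes Curr s ∧ x ≠ c := by
  simp only [pv_pool_mem, List.mem_append, List.mem_singleton]
  tauto

theorem pv_pool_snoc_len {Cubes Curr : List Int} {s : List Char} {c : Int}
    (hc : c ∈ pvPool Cubes Curr s) :
    (pvPool Cubes (Curr ++ [c]) s).length + 1 = (pvPool Cubes Curr s).length :=
  pv_len_sub pv_pool_nodup pv_pool_nodup hc (fun x => pv_pool_snoc x)

theorem pv_groups_getD (Cubes : List Int) (k : List Char) :
    (pvGroups Cubes).getD k [] = PySem.Set.ofList (Cubes.filter (fun c => pvSig c == k)) := by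
  suffices h : ∀ (l : List Int) (d : PySem.Dict (List Char) (List Int)),
      (l.foldl pvGroupStep d).getD k []
        = PySem.Set.update (d.getD k []) (l.filter (fun c => pvSig c == k)) by
    unfold pvGroups
    rw [h Cubes PySem.Dict.empty, PySem.Dict.getD_empty, PySem.Set.update_nil_left]
  intro l
  induction l with
  | nil => intro d; simp [PySem.Set.update]
  | cons c t ih =>
    intro d
    simp only [List.foldl_cons]
    rw [ih]
    by_cases hk : pvSig c = k
    · subst hk
      rw [List.filter_cons, if_pos (by simp), PySem.Set.update_cons]
      unfold pvGroupStep
      rw [PySem.Dict.getD_insert_self]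
    · rw [List.filter_cons, if_neg (by simp [hk])]
      unfold pvGroupStep
      rw [PySem.Dict.getD_insert_of_ne d _ _ (fun h => hk h.symm)]

-- an incoherent Curr admits no extension: the recursion loop returns None
theorem pv_loop_dead {next : List Int → Option Int} {Curr : List Int}
    (hdead : ∀ cube : Int, pvAllPerm Curr cube = false) :
    ∀ rest : List Int, pvLoop next Curr rest = none := by
  intro rest
  induction rest with
  | nil => rfl
  | cons cube t ih =>
    simp only [pvLoop]
    by_cases hc : Curr.contains cube = true
    · simp only [hc, Bool.not_true, Bool.false_eq_true, reduceIte]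
      exact ih
    · simp only [Bool.not_eq_true] at hc
      simp only [hc, Bool.not_false, reduceIte, hdead cube, Bool.false_eq_true]
      exact ih

theorem pv_go_spec : ∀ j : Nat, pvGoSpec j := by
  intro j
  induction j with
  | zero =>
    intro fuel Cubes Curr s _ hfuel hne hcoh hlen
    obtain ⟨f, rfl⟩ : ∃ f, fuel = f + 1 := ⟨fuel - 1, by omega⟩
    simp only [Nat.sub_zero] at hlen
    simp only [pvGo, if_pos hne, if_pos hlen]
    have hch : pvCheck5 Cubes Curr = true ↔ pvPool Cubes Curr s = [] := by
      rw [pv_check5_eq]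
      rw [Bool.not_eq_true', List.any_eq_false]
      constructor
      · intro h
        rw [List.eq_nil_iff_forall_not_mem]
        intro a ha
        rw [pv_pool_mem] at ha
        obtain ⟨haC, haS, haN⟩ := ha
        have := h a haC
        rw [pv_allPerm_coh hne hcoh a, haS] at this
        simp [haN] at this
      · intro h cube hcube
        rw [pv_allPerm_coh hne hcoh cube]
        by_cases hcs : pvSig cube = s
        · by_cases hcc : cube ∈ Curr
          · simp [hcc]
          · exfalso
            have : cube ∈ pvPool Cubes Curr s := (pv_pool_mem cube).mpr ⟨hcube, hcs, hcc⟩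
            rw [h] at this
            exact absurd this (List.not_mem_nil)
        · simp [hcs]
    by_cases hpool : pvPool Cubes Curr s = []
    · rw [if_pos (hch.mpr hpool), hpool]
      simp
    · have hf : pvCheck5 Cubes Curr = false := by
        cases hcc : pvCheck5 Cubes Curr
        · rfl
        · exact absurd (hch.mp hcc) hpool
      rw [hf]
      have : (pvPool Cubes Curr s).length ≠ 0 := by
        intro h
        exact hpool (List.eq_nil_of_length_eq_zero h)
      simp [this]
  | succ j ih =>
    intro fuel Cubes Curr s h4 hfuel hne hcoh hlen
    obtain ⟨f, rfl⟩ : ∃ f, fuel = f + 1 := ⟨fuel - 1, by omega⟩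
    have hjf : j < f := by omega
    simp only [pvGo, if_pos hne, if_neg (show ¬ Curr.length = 5 by omega),
      if_pos (show Curr.length < 5 by omega)]
    have hgood : ∀ rest : List Int, (∀ c ∈ rest, c ∈ Cubes) →
        (pvPool Cubes Curr s).length = j + 1 →
        (∃ c ∈ rest, pvSig c = s ∧ c ∉ Curr) →
        pvLoop (pvGo f Cubes) Curr rest
          = PySem.List.min? (Curr ++ pvPool Cubes Curr s) (fun x => x) := by
      intro rest
      induction rest with
      | nil => intro _ _ hex; simp at hex
      | cons cube t iht =>
        intro hsub hpl hex
        simp only [pvLoop]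
        by_cases hc : Curr.contains cube = true
        · simp only [hc, Bool.not_true, Bool.false_eq_true, reduceIte]
          refine iht (fun c h => hsub c (List.mem_cons_of_mem _ h)) hpl ?_
          obtain ⟨c, hcmem, hcs, hcn⟩ := hex
          rcases List.mem_cons.mp hcmem with rfl | hct
          · exact absurd (List.contains_iff_mem.mp hc) hcn
          · exact ⟨c, hct, hcs, hcn⟩
        · simp only [Bool.not_eq_true] at hc
          have hcn : cube ∉ Curr := by
            intro h
            rw [List.contains_iff_mem.mpr h] at hc
            cases hc
          simp only [hc, Bool.not_false, reduceIte, pv_allPerm_coh hne hcoh cube]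
          by_cases hs : pvSig cube = s
          · simp only [hs, beq_self_eq_true, reduceIte]
            have hcp : cube ∈ pvPool Cubes Curr s :=
              (pv_pool_mem cube).mpr ⟨hsub cube List.mem_cons_self, hs, hcn⟩
            have hplen := pv_pool_snoc_len hcp
            have hrec := ih f Cubes (Curr ++ [cube]) s (by omega) hjf (by simp)
              (by
                intro x hx
                rcases List.mem_append.mp hx with hx1 | hx2
                · exact hcoh x hx1
                · rw [List.mem_singleton.mp hx2]; exact hs)
              (by rw [List.length_append, List.length_singleton]; omega)
            rw [if_pos (by omega)] at hrec
            rw [hrec]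
            have hmeq : PySem.List.min? ((Curr ++ [cube]) ++ pvPool Cubes (Curr ++ [cube]) s) (fun x => x)
                = PySem.List.min? (Curr ++ pvPool Cubes Curr s) (fun x => x) := by
              apply pv_min_congr
              intro x
              simp only [List.mem_append, List.mem_singleton, pv_pool_snoc]
              constructor
              · rintro ((hx | rfl) | ⟨hx, _⟩)
                · exact Or.inl hx
                · exact Or.inr hcp
                · exact Or.inr hx
              · rintro (hx | hx)
                · exact Or.inl (Or.inl hx)
                · by_cases hxc : x = cube
                  · exact Or.inl (Or.inr hxc)
                  · exact Or.inr ⟨hx, hxc⟩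
            rw [hmeq]
            cases hm : PySem.List.min? (Curr ++ pvPool Cubes Curr s) (fun x => x) with
            | none =>
              rw [PySem.List.min?_eq_none_iff] at hm
              exact absurd (List.append_eq_nil_iff.mp hm).1 hne
            | some r => rfl
          · have hbs : (pvSig cube == s) = false := by
              simp [hs]
            simp only [hbs, Bool.false_eq_true, reduceIte]
            refine iht (fun c h => hsub c (List.mem_cons_of_mem _ h)) hpl ?_
            obtain ⟨c, hcmem, hcs, hcnn⟩ := hex
            rcases List.mem_cons.mp hcmem with rfl | hct
            · exact absurd hcs hs
            · exact ⟨c, hct, hcs, hcnn⟩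
    have hbad : ∀ rest : List Int, (∀ c ∈ rest, c ∈ Cubes) →
        (pvPool Cubes Curr s).length ≠ j + 1 →
        pvLoop (pvGo f Cubes) Curr rest = none := by
      intro rest
      induction rest with
      | nil => intro _ _; rfl
      | cons cube t iht =>
        intro hsub hpl
        simp only [pvLoop]
        by_cases hc : Curr.contains cube = true
        · simp only [hc, Bool.not_true, Bool.false_eq_true, reduceIte]
          exact iht (fun c h => hsub c (List.mem_cons_of_mem _ h)) hpl
        · simp only [Bool.not_eq_true] at hc
          have hcn : cube ∉ Curr := by
            intro h
            rw [List.contains_iff_mem.mpr h] at hc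
            cases hc
          simp only [hc, Bool.not_false, reduceIte, pv_allPerm_coh hne hcoh cube]
          by_cases hs : pvSig cube = s
          · simp only [hs, beq_self_eq_true, reduceIte]
            have hcp : cube ∈ pvPool Cubes Curr s :=
              (pv_pool_mem cube).mpr ⟨hsub cube List.mem_cons_self, hs, hcn⟩
            have hplen := pv_pool_snoc_len hcp
            have hrec := ih f Cubes (Curr ++ [cube]) s (by omega) hjf (by simp)
              (by
                intro x hx
                rcases List.mem_append.mp hx with hx1 | hx2
                · exact hcoh x hx1
                · rw [List.mem_singleton.mp hx2]; exact hs)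
              (by rw [List.length_append, List.length_singleton]; omega)
            rw [if_neg (by omega)] at hrec
            rw [hrec]
            exact iht (fun c h => hsub c (List.mem_cons_of_mem _ h)) hpl
          · have hbs : (pvSig cube == s) = false := by
              simp [hs]
            simp only [hbs, Bool.false_eq_true, reduceIte]
            exact iht (fun c h => hsub c (List.mem_cons_of_mem _ h)) hpl
    by_cases hpl : (pvPool Cubes Curr s).length = j + 1
    · rw [if_pos hpl]
      refine hgood Cubes (fun c h => h) hpl ?_
      have hne' : pvPool Cubes Curr s ≠ [] := by
        intro h
        rw [h] at hpl
        simp at hpl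
      obtain ⟨c, hcmem⟩ := List.exists_mem_of_ne_nil _ hne'
      have := (pv_pool_mem c).mp hcmem
      exact ⟨c, this.1, this.2.1, this.2.2⟩
    · rw [if_neg hpl]
      exact hbad Cubes (fun c h => h) hpl

theorem pv_scan_eq (Cubes : List Int) : ∀ rest : List Int, (∀ c ∈ rest, c ∈ Cubes) →
    pvLoopE (pvGo 5 Cubes) rest = pvScan (pvGroups Cubes) rest := by
  intro rest
  induction rest with
  | nil => intro _; rfl
  | cons c t ih =>
    intro hsub
    simp only [pvLoopE, pvScan]
    have hcC : c ∈ Cubes := hsub c List.mem_cons_self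
    have hgo := pv_go_spec 4 5 Cubes [c] (pvSig c) (le_refl 4) (by omega) (by simp)
      (by intro x hx; rw [List.mem_singleton.mp hx]) (by simp)
    have hgrp := pv_groups_getD Cubes (pvSig c)
    have hgmem : ∀ x : Int, x ∈ (pvGroups Cubes).getD (pvSig c) [] ↔ x ∈ Cubes ∧ pvSig x = pvSig c := by
      intro x
      rw [hgrp, PySem.Set.mem_ofList, List.mem_filter]
      simp
    have hgnodup : ((pvGroups Cubes).getD (pvSig c) []).Nodup := by
      rw [hgrp]; exact PySem.Set.nodup_ofList _
    have hcg : c ∈ (pvGroups Cubes).getD (pvSig c) [] := (hgmem c).mpr ⟨hcC, rfl⟩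
    have hpoolmem : ∀ x : Int, x ∈ pvPool Cubes [c] (pvSig c) ↔
        x ∈ (pvGroups Cubes).getD (pvSig c) [] ∧ x ≠ c := by
      intro x
      rw [pv_pool_mem, hgmem]
      simp only [List.mem_singleton]
      tauto
    have hlen : (pvPool Cubes [c] (pvSig c)).length + 1
        = ((pvGroups Cubes).getD (pvSig c) []).length :=
      pv_len_sub hgnodup pv_pool_nodup hcg hpoolmem
    by_cases h5 : ((pvGroups Cubes).getD (pvSig c) []).length = 5
    · rw [if_pos (by omega : (pvPool Cubes [c] (pvSig c)).length = 4)] at hgo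
      rw [hgo, if_pos h5]
      have hmeq : PySem.List.min? ([c] ++ pvPool Cubes [c] (pvSig c)) (fun x => x)
          = PySem.List.min? ((pvGroups Cubes).getD (pvSig c) []) (fun x => x) := by
        apply pv_min_congr
        intro x
        simp only [List.mem_append, List.mem_singleton, hpoolmem]
        constructor
        · rintro (rfl | ⟨hx, _⟩)
          · exact hcg
          · exact hx
        · intro hx
          by_cases hxc : x = c
          · exact Or.inl hxc
          · exact Or.inr ⟨hx, hxc⟩
      rw [hmeq]
      cases hm : PySem.List.min? ((pvGroups Cubes).getD (pvSig c) []) (fun x => x) with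
      | none =>
        rw [PySem.List.min?_eq_none_iff] at hm
        rw [hm] at hcg
        exact absurd hcg (List.not_mem_nil)
      | some r => rfl
    · rw [if_neg (by omega : ¬ (pvPool Cubes [c] (pvSig c)).length = 4)] at hgo
      rw [hgo, if_neg h5]
      exact ih (fun x h => hsub x (List.mem_cons_of_mem _ h))

-- one controlled unfolding of pvGo at the entry fuel
theorem pv_go6 (Cubes Curr : List Int) : pvGo 6 Cubes Curr =
    if Curr ≠ [] then
      if Curr.length = 5 then
        (if pvCheck5 Cubes Curr then PySem.List.min? Curr (fun x => x) else none)
      else if Curr.length < 5 then pvLoop (pvGo 5 Cubes) Curr Cubes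
      else none
    else pvLoopE (pvGo 5 Cubes) Cubes := rfl

theorem pv_main (Cubes Curr : List Int) (hD : ¬ D_backtracking Cubes Curr) :
    backtracking Cubes Curr = backtracking_alt Cubes Curr := by
  unfold backtracking backtracking_alt
  cases Curr with
  | nil =>
    rw [pv_go6, if_neg (by simp : ¬ ([] : List Int) ≠ [])]
    exact pv_scan_eq Cubes Cubes (fun c h => h)
  | cons c0 rest =>
    have hlc : (c0 :: rest).length = rest.length + 1 := List.length_cons
    by_cases hcoh : ∀ x ∈ (c0 :: rest), pvSig x = pvSig c0
    · have hany : ((c0 :: rest).any fun x => !(pvSig x == pvSig c0)) = false := by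
        rw [List.any_eq_false]
        intro x hx
        rw [hcoh x hx]
        simp
      simp only [hany, Bool.false_eq_true, reduceIte]
      have hpf : PySem.Set.ofList ((Cubes.filter (fun c => pvSig c == pvSig c0 && !((c0 :: rest).contains c))))
          = pvPool Cubes (c0 :: rest) (pvSig c0) := rfl
      rw [hpf]
      by_cases hk : (c0 :: rest).length ≤ 5
      · have hgo := pv_go_spec (5 - (c0 :: rest).length) 6 Cubes (c0 :: rest) (pvSig c0)
          (by omega) (by omega) (by simp) hcoh (by omega)
        rw [hgo]
        by_cases hpl : (pvPool Cubes (c0 :: rest) (pvSig c0)).length = 5 - (c0 :: rest).length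
        · rw [if_pos hpl, if_pos (by omega)]
        · rw [if_neg hpl, if_neg (by omega)]
      · rw [pv_go6, if_pos (by simp : (c0 :: rest) ≠ []),
          if_neg (show ¬ (c0 :: rest).length = 5 by omega),
          if_neg (show ¬ (c0 :: rest).length < 5 by omega),
          if_neg (show ¬ (c0 :: rest).length + (pvPool Cubes (c0 :: rest) (pvSig c0)).length = 5 by omega)]
    · have hincoh : ∃ x ∈ (c0 :: rest), pvSig x ≠ pvSig c0 := by
        by_contra hcon
        refine hcoh (fun x hx => ?_)
        by_contra hne
        exact hcon ⟨x, hx, hne⟩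
      obtain ⟨x, hx, hxs⟩ := hincoh
      have hany : ((c0 :: rest).any fun x => !(pvSig x == pvSig c0)) = true := by
        rw [List.any_eq_true]
        exact ⟨x, hx, by simp [hxs]⟩
      simp only [hany, reduceIte]
      have hdead : ∀ cube : Int, pvAllPerm (c0 :: rest) cube = false :=
        pv_allPerm_incoh hx List.mem_cons_self hxs
      have h5 : (c0 :: rest).length ≠ 5 := by
        intro h5
        refine hD ⟨h5, x, hx, c0, List.mem_cons_self, ?_⟩
        rw [pv_arePerm]
        exact beq_eq_false_iff_ne.mpr hxs
      by_cases hlt : (c0 :: rest).length < 5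
      · rw [pv_go6, if_pos (by simp : (c0 :: rest) ≠ []), if_neg h5, if_pos hlt]
        exact pv_loop_dead hdead Cubes
      · rw [pv_go6, if_pos (by simp : (c0 :: rest) ≠ []), if_neg h5, if_neg hlt]

theorem pv_exact (Cubes Curr : List Int) (hD : D_backtracking Cubes Curr) :
    backtracking Cubes Curr ≠ backtracking_alt Cubes Curr := by
  obtain ⟨h5, x, hx, y, hy, hxy0⟩ := hD
  rw [pv_arePerm] at hxy0
  have hxy : pvSig x ≠ pvSig y := beq_eq_false_iff_ne.mp hxy0
  cases Curr with
  | nil => simp at h5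
  | cons c0 rest =>
    unfold backtracking backtracking_alt
    -- B side: some element differs from sig c0, so the any-test fires and B = none
    have hone : ∃ z ∈ (c0 :: rest), pvSig z ≠ pvSig c0 := by
      by_cases hxc : pvSig x = pvSig c0
      · exact ⟨y, hy, fun h => hxy (hxc.trans h.symm)⟩
      · exact ⟨x, hx, hxc⟩
    obtain ⟨z, hz, hzs⟩ := hone
    have hany : ((c0 :: rest).any fun w => !(pvSig w == pvSig c0)) = true := by
      rw [List.any_eq_true]
      exact ⟨z, hz, by simp [hzs]⟩
    simp only [hany, reduceIte]
    -- A side: vacuous check, A = some (min Curr)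
    have hdead : ∀ cube : Int, pvAllPerm (c0 :: rest) cube = false :=
      pv_allPerm_incoh hx hy hxy
    have hch : pvCheck5 Cubes (c0 :: rest) = true := by
      rw [pv_check5_eq, Bool.not_eq_true', List.any_eq_false]
      intro cube _
      rw [hdead cube]
      simp
    rw [pv_go6, if_pos (by simp : (c0 :: rest) ≠ []), if_pos h5]
    simp only [hch, reduceIte]
    cases hm : PySem.List.min? (c0 :: rest) (fun v => v) with
    | none =>
      rw [PySem.List.min?_eq_none_iff] at hm
      cases hm
    | some m => simp

-- ===== VERDICT (by name: the statement is the Claim_ definition above) =====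
theorem backtracking_spec : Claim_unchanged_backtracking := by
  intro Cubes Curr _ hD
  exact pv_main Cubes Curr hD

theorem backtracking_changed : Claim_changed_backtracking := by
  unfold Claim_changed_backtracking; decide

theorem backtracking_tight : Claim_exact_backtracking := by
  intro Cubes Curr _ hD
  exact pv_exact Cubes Curr hD
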